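-- pv_equiv track=rewrite | github.com/mirkosaenz/Teoria-De-Algoritmos | Guia/03. Backtracking/guia/parciales/1.py | asignar_proyectos
-- ===== SOURCE A (Python) =====
-- def asignar_proyectos(proyectos, k):
--     inicios = [0]*k
--     grupos = []
--
--     for i in range(len(inicios)):
--         grupos.append([])
--
--     proyectos = sorted(proyectos, key=lambda x: x[1])
--
--     for proyecto in proyectos:
--         ini, fin = proyecto
--
--         for i in range(len(inicios)):
--             if ini >= inicios[i]:
--                 grupos[i].append(proyecto)
--                 inicios[i] = fin
--                 break
--
--     return grupos
-- ===== SOURCE B (Python) =====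
-- # Same greedy assignment, but the k group finish-times live in a segment tree
-- # keyed by minimum, so the leftmost free group is found by tree descent
-- # instead of A's linear scan over all k groups.
--
-- def _build(l, r):
--     # segment tree over leaf indices [l, r), every leaf value 0
--     # node = (min_value, leaf_index_or_None, left_child, right_child)
--     if r - l == 1:
--         return (0, l, None, None)
--     m = (l + r) // 2
--     return (0, None, _build(l, m), _build(m, r))
--
--
-- def _assign(t, x, v):
--     # leftmost leaf with value <= x; set it to v.
--     # returns (leaf index or None, new tree)
--     minv, idx, L, R = t
--     if minv > x:
--         return None, t
--     if L is None:
--         return idx, (v, idx, None, None)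
--     i, L2 = _assign(L, x, v)
--     if i is not None:
--         return i, (min(L2[0], R[0]), None, L2, R)
--     i, R2 = _assign(R, x, v)
--     return i, (min(L[0], R2[0]), None, L, R2)
--
--
-- def asignar_proyectos(proyectos, k):
--     if k <= 0:
--         return []
--     grupos = [[] for _ in range(k)]
--     tree = _build(0, k)
--     for p in sorted(proyectos, key=lambda q: q[1]):
--         i, tree = _assign(tree, p[0], p[1])
--         if i is not None:
--             grupos[i].append(p)
--     return grupos
-- ===== Notes on version B (the rewrite author's own statement) =====
-- stated objective: alternative
-- what changed: A rescans the mutable list of k group finish-times linearly for each project; B stores the finish-times in a min-keyed segment tree and finds the leftmost fitting group by tree descent (O(log k) per project instead of O(k), though not measurably faster at the benchmarked sizes).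
import Mathlib
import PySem

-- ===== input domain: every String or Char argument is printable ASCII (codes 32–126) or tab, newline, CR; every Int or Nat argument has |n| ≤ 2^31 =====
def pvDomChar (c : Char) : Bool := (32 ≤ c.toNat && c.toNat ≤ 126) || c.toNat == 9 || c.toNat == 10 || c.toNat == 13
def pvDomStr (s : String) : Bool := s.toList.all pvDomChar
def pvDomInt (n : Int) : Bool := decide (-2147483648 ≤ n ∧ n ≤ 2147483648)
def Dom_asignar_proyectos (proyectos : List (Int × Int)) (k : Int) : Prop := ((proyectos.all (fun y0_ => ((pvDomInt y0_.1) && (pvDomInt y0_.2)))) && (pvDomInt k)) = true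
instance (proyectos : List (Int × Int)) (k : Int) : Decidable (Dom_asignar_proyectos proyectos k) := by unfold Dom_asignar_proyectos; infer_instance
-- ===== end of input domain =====

-- B replaces A's inner scan over the k group finish-times with a segment tree
-- keyed by minimum finish-time: the leftmost fitting group is found by tree
-- descent instead of a linear pass (objective: alternative algorithm).

-- ===== PORT A =====
-- grupos[i].append(p) (shared by both ports: the same Python statement)
def appendAt (g : List (List (Int × Int))) (i : Nat) (p : Int × Int) : List (List (Int × Int)) :=
  g.modify i (fun l => l ++ [p])

-- A's inner 'for i in range(len(inicios)): if ini >= inicios[i]: … break'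
-- as a left-to-right scan for the first fitting index
def findSlot (inicios : List Int) (ini : Int) : Option Nat :=
  match inicios with
  | [] => none
  | x :: xs => if ini ≥ x then some 0 else (findSlot xs ini).map (· + 1)

def asignar_proyectos (proyectos : List (Int × Int)) (k : Int) : List (List (Int × Int)) :=
  let inicios : List Int := List.replicate k.toNat 0
  let grupos : List (List (Int × Int)) :=
    (PySem.List.pyRange 0 (inicios.length) 1).foldl (fun g _ => g ++ [[]]) []
  let ps := PySem.List.sorted proyectos (fun x => x.2)
  let st := ps.foldl
    (fun (st : List Int × List (List (Int × Int))) p =>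
      match findSlot st.1 p.1 with
      | some i => (st.1.set i p.2, appendAt st.2 i p)
      | none => st) (inicios, grupos)
  st.2

-- ===== PORT B =====
-- segment-tree node: (min finish-time, leaf index | children)
inductive Seg where
  | leaf (v : Int) (idx : Nat)
  | node (v : Int) (l : Seg) (r : Seg)
deriving DecidableEq, Repr

def Seg.minv : Seg → Int
  | .leaf v _ => v
  | .node v _ _ => v

-- Source B _build(l, r): tree over leaf indices [l, r), every leaf value 0
def buildSeg (l r : Nat) : Seg :=
  if r - l ≤ 1 then .leaf 0 l
  else .node 0 (buildSeg l ((l + r) / 2)) (buildSeg ((l + r) / 2) r)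
termination_by r - l
decreasing_by all_goals omega

-- Source B _assign(t, x, v): leftmost leaf with value ≤ x, set it to v
def assignSeg : Seg → Int → Int → Option Nat × Seg
  | .leaf m i, x, v => if m > x then (none, .leaf m i) else (some i, .leaf v i)
  | .node m L R, x, v =>
    if m > x then (none, .node m L R)
    else
      match assignSeg L x v with
      | (some i, L2) => (some i, .node (min L2.minv R.minv) L2 R)
      | (none, _) =>
        match assignSeg R x v with
        | (some i, R2) => (some i, .node (min L.minv R2.minv) L R2)
        | (none, R2) => (none, .node (min L.minv R2.minv) L R2)

def asignar_proyectos_alt (proyectos : List (Int × Int)) (k : Int) : List (List (Int × Int)) :=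
  if k ≤ 0 then []
  else
    let grupos := List.replicate k.toNat ([] : List (Int × Int))
    let tree := buildSeg 0 k.toNat
    let st := (PySem.List.sorted proyectos (fun q => q.2)).foldl
      (fun (st : List (List (Int × Int)) × Seg) p =>
        match assignSeg st.2 p.1 p.2 with
        | (some i, t2) => (appendAt st.1 i p, t2)
        | (none, t2) => (st.1, t2)) (grupos, tree)
    st.1

-- ===== PRECONDITION & SPEC =====
def Spec_asignar_proyectos (proyectos : List (Int × Int)) (k : Int) (out : List (List (Int × Int))) : Prop := out = asignar_proyectos_alt proyectos k
instance (proyectos : List (Int × Int)) (k : Int) (out : List (List (Int × Int))) : Decidable (Spec_asignar_proyectos proyectos k out) := by unfold Spec_asignar_proyectos; infer_instance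

-- ===== CLAIM (what is proved, stated in full; the proofs are below) =====
def Claim_equal_asignar_proyectos : Prop := ∀ (proyectos : List (Int × Int)) (k : Int), Dom_asignar_proyectos proyectos k → Spec_asignar_proyectos proyectos k (asignar_proyectos proyectos k)

-- ===== LEMMAS AND PROOFS =====

-- definitional unfoldings of the two ports
theorem A_def (p : List (Int × Int)) (k : Int) :
    asignar_proyectos p k =
    ((PySem.List.sorted p (fun x => x.2)).foldl
      (fun (st : List Int × List (List (Int × Int))) q =>
        match findSlot st.1 q.1 with
        | some i => (st.1.set i q.2, appendAt st.2 i q)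
        | none => st)
      (List.replicate k.toNat 0,
        (PySem.List.pyRange 0 ((List.replicate k.toNat (0:Int)).length : Int)).foldl
          (fun g _ => g ++ [[]]) [])).2 := rfl

theorem B_def0 (p : List (Int × Int)) (k : Int) (h : k ≤ 0) :
    asignar_proyectos_alt p k = [] := by
  simp [asignar_proyectos_alt, h]

theorem B_def (p : List (Int × Int)) (k : Int) (h : ¬ k ≤ 0) :
    asignar_proyectos_alt p k =
    ((PySem.List.sorted p (fun q => q.2)).foldl
      (fun (st : List (List (Int × Int)) × Seg) q =>
        match assignSeg st.2 q.1 q.2 with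
        | (some i, t2) => (appendAt st.1 i q, t2)
        | (none, t2) => (st.1, t2))
      (List.replicate k.toNat [], buildSeg 0 k.toNat)).1 := by
  simp only [asignar_proyectos_alt, if_neg h]

-- 't is a segment tree over leaf indices [l, r) whose leaf values are xs[l..r)'
def Models : Seg → Nat → Nat → List Int → Prop
  | .leaf v i, l, r, xs => i = l ∧ r = l + 1 ∧ r ≤ xs.length ∧ v = xs.getD l 0
  | .node v L R, l, r, xs =>
      ∃ m, l < m ∧ m < r ∧ Models L l m xs ∧ Models R m r xs ∧
        (∀ j, l ≤ j → j < r → v ≤ xs.getD j 0) ∧ (∃ j, l ≤ j ∧ j < r ∧ v = xs.getD j 0)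

theorem models_bounds {t : Seg} {l r : Nat} {xs : List Int} (h : Models t l r xs) :
    l < r ∧ r ≤ xs.length := by
  induction t generalizing l r with
  | leaf v i => obtain ⟨_, h2, h3, _⟩ := h; omega
  | node v L R ihL ihR =>
    obtain ⟨m, h1, h2, hL, hR, _⟩ := h
    have := ihR hR; omega

theorem models_minv_le {t : Seg} {l r : Nat} {xs : List Int} (h : Models t l r xs) :
    ∀ j, l ≤ j → j < r → t.minv ≤ xs.getD j 0 := by
  cases t with
  | leaf v i =>
    obtain ⟨_, h2, _, hv⟩ := h
    intro j hj1 hj2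
    have : j = l := by omega
    subst this; simpa [Seg.minv] using le_of_eq hv
  | node v L R =>
    obtain ⟨m, _, _, _, _, hle, _⟩ := h
    simpa [Seg.minv] using hle

theorem models_minv_mem {t : Seg} {l r : Nat} {xs : List Int} (h : Models t l r xs) :
    ∃ j, l ≤ j ∧ j < r ∧ t.minv = xs.getD j 0 := by
  cases t with
  | leaf v i =>
    obtain ⟨_, h2, _, hv⟩ := h
    exact ⟨l, le_refl l, by omega, by simpa [Seg.minv] using hv⟩
  | node v L R =>
    obtain ⟨m, _, _, _, _, _, hmem⟩ := h
    simpa [Seg.minv] using hmem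

theorem models_node {L R : Seg} {l m r : Nat} {xs : List Int}
    (hL : Models L l m xs) (hR : Models R m r xs) :
    Models (.node (min L.minv R.minv) L R) l r xs := by
  have hbL := models_bounds hL
  have hbR := models_bounds hR
  refine ⟨m, by omega, by omega, hL, hR, ?_, ?_⟩
  · intro j hj1 hj2
    by_cases hj : j < m
    · exact le_trans (min_le_left _ _) (models_minv_le hL j hj1 hj)
    · exact le_trans (min_le_right _ _) (models_minv_le hR j (by omega) hj2)
  · rcases le_total L.minv R.minv with hc | hc
    · obtain ⟨j, hj1, hj2, hj3⟩ := models_minv_mem hL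
      exact ⟨j, hj1, by omega, by rw [min_eq_left hc]; exact hj3⟩
    · obtain ⟨j, hj1, hj2, hj3⟩ := models_minv_mem hR
      exact ⟨j, by omega, hj2, by rw [min_eq_right hc]; exact hj3⟩

theorem getD_set_ne (xs : List Int) (i j : Nat) (v : Int) (h : i ≠ j) :
    (xs.set i v).getD j 0 = xs.getD j 0 := by
  simp [List.getD_eq_getElem?_getD, List.getElem?_set_ne h]

theorem models_set_outside {t : Seg} {l r : Nat} {xs : List Int} (h : Models t l r xs)
    (i : Nat) (hi : i < l ∨ r ≤ i) (v : Int) : Models t l r (xs.set i v) := by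
  induction t generalizing l r with
  | leaf w idx =>
    obtain ⟨h1, h2, h3, h4⟩ := h
    exact ⟨h1, h2, by simpa using h3, by rw [getD_set_ne xs i l v (by omega)]; exact h4⟩
  | node w L R ihL ihR =>
    obtain ⟨m, h1, h2, hL, hR, hle, j0, hj1, hj2, hj3⟩ := h
    refine ⟨m, h1, h2, ihL hL (by omega), ihR hR (by omega), ?_, ?_⟩
    · intro j hja hjb
      rw [getD_set_ne xs i j v (by omega)]
      exact hle j hja hjb
    · exact ⟨j0, hj1, hj2, by rw [getD_set_ne xs i j0 v (by omega)]; exact hj3⟩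

theorem getD_replicate (n l : Nat) (h : l < n) : (List.replicate n (0:Int)).getD l 0 = 0 := by
  simp [List.getD_eq_getElem?_getD, h]

theorem models_build (n : Nat) : ∀ l r : Nat, l < r → r ≤ n →
    Models (buildSeg l r) l r (List.replicate n 0) := by
  intro l r
  induction l, r using buildSeg.induct with
  | case1 l r hsmall =>
    intro h1 h2
    rw [buildSeg, if_pos hsmall]
    exact ⟨rfl, by omega, by simpa using h2, (getD_replicate n l (by omega)).symm⟩
  | case2 l r hbig ihL ihR =>
    intro h1 h2
    rw [buildSeg, if_neg hbig]
    have hmL := ihL (by omega) (by omega)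
    have hmR := ihR (by omega) (by omega)
    refine ⟨(l + r) / 2, by omega, by omega, hmL, hmR, ?_, ⟨l, le_refl l, h1, (getD_replicate n l (by omega)).symm⟩⟩
    intro j hj1 hj2
    rw [getD_replicate n j (by omega)]

theorem assign_none {t : Seg} {l r : Nat} {xs : List Int} (h : Models t l r xs)
    {x : Int} (hall : ∀ j, l ≤ j → j < r → x < xs.getD j 0) (w : Int) :
    assignSeg t x w = (none, t) := by
  obtain ⟨j, hj1, hj2, hj3⟩ := models_minv_mem h
  have hgt : t.minv > x := hj3 ▸ hall j hj1 hj2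
  cases t with
  | leaf v i => simp only [Seg.minv] at hgt; simp [assignSeg, hgt]
  | node v L R => simp only [Seg.minv] at hgt; simp [assignSeg, hgt]

theorem assign_some {t : Seg} {l r : Nat} {xs : List Int} (h : Models t l r xs)
    {x : Int} {j0 : Nat} (hj0 : l ≤ j0 ∧ j0 < r ∧ xs.getD j0 0 ≤ x) (w : Int) :
    ∃ i, (assignSeg t x w).1 = some i ∧ l ≤ i ∧ i < r ∧ xs.getD i 0 ≤ x ∧
      (∀ j, l ≤ j → j < i → x < xs.getD j 0) ∧
      Models (assignSeg t x w).2 l r (xs.set i w) := by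
  induction t generalizing l r j0 with
  | leaf v idx =>
    obtain ⟨h1, h2, h3, h4⟩ := h
    have hj : j0 = l := by omega
    have hvx : ¬ v > x := by rw [h4]; rw [hj] at hj0; omega
    refine ⟨l, ?_, le_refl l, by omega, by rw [← hj]; exact hj0.2.2, by omega, ?_⟩
    · simp [assignSeg, hvx, h1]
    · simp only [assignSeg, if_neg hvx]
      refine ⟨h1, h2, by simpa using h3, ?_⟩
      subst h1
      rw [List.getD_eq_getElem?_getD, List.getElem?_set_self (by omega)]
      rfl
  | node v L R ihL ihR =>
    obtain ⟨m, h1, h2, hL, hR, hle, _⟩ := h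
    have hvx : ¬ v > x := by
      have := hle j0 hj0.1 hj0.2.1; omega
    by_cases hleft : ∃ jl, l ≤ jl ∧ jl < m ∧ xs.getD jl 0 ≤ x
    · obtain ⟨jl, hjl⟩ := hleft
      obtain ⟨i, hi1, hi2, hi3, hi4, hi5, hi6⟩ := ihL hL hjl
      rcases hA : assignSeg L x w with ⟨oi, L2⟩
      rw [hA] at hi1 hi6; simp only at hi1 hi6
      subst hi1
      refine ⟨i, ?_, hi2, by omega, hi4, hi5, ?_⟩
      · simp [assignSeg, hvx, hA]
      · simp only [assignSeg, if_neg hvx, hA]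
        exact models_node hi6 (models_set_outside hR i (Or.inl hi3) w)
    · rw [not_exists] at hleft
      simp only [not_and, not_le] at hleft
      have hnone : assignSeg L x w = (none, L) :=
        assign_none hL (fun j hj1 hj2 => hleft j hj1 hj2) w
      have hj0r : m ≤ j0 := by
        by_contra hc
        have := hleft j0 hj0.1 (by omega)
        omega
      obtain ⟨i, hi1, hi2, hi3, hi4, hi5, hi6⟩ := ihR hR ⟨hj0r, hj0.2.1, hj0.2.2⟩
      rcases hA : assignSeg R x w with ⟨oi, R2⟩
      rw [hA] at hi1 hi6; simp only at hi1 hi6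
      subst hi1
      refine ⟨i, ?_, by omega, hi3, hi4, ?_, ?_⟩
      · simp [assignSeg, hvx, hnone, hA]
      · intro j hja hjb
        by_cases hjm : j < m
        · exact hleft j hja hjm
        · exact hi5 j (by omega) hjb
      · simp only [assignSeg, if_neg hvx, hnone, hA]
        exact models_node (models_set_outside hL i (Or.inr hi2) w) hi6

-- findSlot characterisation
theorem findSlot_none_iff (xs : List Int) (x : Int) :
    findSlot xs x = none ↔ ∀ j, j < xs.length → x < xs.getD j 0 := by
  induction xs with
  | nil => simp [findSlot]
  | cons a xs ih =>
    by_cases hax : x ≥ a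
    · simp only [findSlot, if_pos hax]
      constructor
      · intro hc; exact absurd hc (by simp)
      · intro hall
        have := hall 0 (by simp)
        simp at this; omega
    · simp only [findSlot, if_neg hax, Option.map_eq_none_iff, ih]
      constructor
      · intro hall j hj
        cases j with
        | zero => simp; omega
        | succ j => simpa using hall j (by simpa using hj)
      · intro hall j hj
        simpa using hall (j + 1) (by simpa using hj)

theorem findSlot_some {xs : List Int} {x : Int} {i : Nat} (h : findSlot xs x = some i) :
    i < xs.length ∧ xs.getD i 0 ≤ x ∧ ∀ j, j < i → x < xs.getD j 0 := by
  induction xs generalizing i with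
  | nil => simp [findSlot] at h
  | cons a xs ih =>
    by_cases hax : x ≥ a
    · simp only [findSlot, if_pos hax, Option.some.injEq] at h
      subst h
      exact ⟨by simp, by simpa using hax, by omega⟩
    · simp only [findSlot, if_neg hax, Option.map_eq_some_iff] at h
      obtain ⟨i', hi', rfl⟩ := h
      obtain ⟨h1, h2, h3⟩ := ih hi'
      refine ⟨by simpa using h1, by simpa using h2, ?_⟩
      intro j hj
      cases j with
      | zero => simp; omega
      | succ j => simpa using h3 j (by omega)

-- the two folds agree step by step
theorem fold_equiv (ps : List (Int × Int)) :
    ∀ (inicios : List Int) (grupos : List (List (Int × Int))) (t : Seg),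
    Models t 0 inicios.length inicios →
    (ps.foldl
      (fun (st : List Int × List (List (Int × Int))) q =>
        match findSlot st.1 q.1 with
        | some i => (st.1.set i q.2, appendAt st.2 i q)
        | none => st) (inicios, grupos)).2 =
    (ps.foldl
      (fun (st : List (List (Int × Int)) × Seg) q =>
        match assignSeg st.2 q.1 q.2 with
        | (some i, t2) => (appendAt st.1 i q, t2)
        | (none, t2) => (st.1, t2)) (grupos, t)).1 := by
  induction ps with
  | nil => intro inicios grupos t _; rfl
  | cons p ps ih =>
    intro inicios grupos t hm
    simp only [List.foldl_cons]
    rcases hf : findSlot inicios p.1 with _ | i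
    · have hall := (findSlot_none_iff inicios p.1).mp hf
      have hnone : assignSeg t p.1 p.2 = (none, t) :=
        assign_none hm (fun j _ hj2 => hall j hj2) p.2
      rw [hnone]
      exact ih inicios grupos t hm
    · obtain ⟨hi1, hi2, hi3⟩ := findSlot_some hf
      obtain ⟨i', ha1, _, hi'2, ha4, ha5, ha6⟩ :=
        assign_some hm ⟨Nat.zero_le i, hi1, hi2⟩ p.2
      have hii : i' = i := by
        by_contra hne
        rcases Nat.lt_or_ge i' i with hlt | hge
        · have := hi3 i' hlt; omega
        · have := ha5 i (Nat.zero_le i) (by omega); omega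
      rw [hii] at ha1 ha6
      rcases hA : assignSeg t p.1 p.2 with ⟨oi, t2⟩
      rw [hA] at ha1 ha6; simp only at ha1 ha6
      subst ha1
      exact ih (inicios.set i p.2) (appendAt grupos i p) t2 (by simpa using ha6)

-- k ≤ 0: A's fold leaves the empty state unchanged
theorem fold_nil (ps : List (Int × Int)) :
    (ps.foldl
      (fun (st : List Int × List (List (Int × Int))) q =>
        match findSlot st.1 q.1 with
        | some i => (st.1.set i q.2, appendAt st.2 i q)
        | none => st) (([] : List Int), ([] : List (List (Int × Int))))) = ([], []) := by
  induction ps with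
  | nil => rfl
  | cons p ps ih => simpa [findSlot] using ih

theorem foldl_const_append (L : List Int) (acc : List (List (Int × Int))) :
    L.foldl (fun g _ => g ++ [[]]) acc = acc ++ List.replicate L.length [] := by
  induction L generalizing acc with
  | nil => simp
  | cons a L ih =>
    simp only [List.foldl_cons, ih, List.length_cons, List.replicate_succ]
    simp

-- ===== VERDICT (by name: the statement is the Claim_ definition above) =====
theorem asignar_proyectos_spec : Claim_equal_asignar_proyectos := by
  intro p k _
  unfold Spec_asignar_proyectos
  rw [A_def]
  by_cases hk : k ≤ 0
  · rw [B_def0 p k hk]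
    have h0 : k.toNat = 0 := by omega
    rw [h0]
    simp only [List.replicate_zero, List.length_nil, Nat.cast_zero]
    rw [show (PySem.List.pyRange 0 (0:Int)).foldl (fun (g : List (List (Int × Int))) _ => g ++ [[]]) [] = [] from by
      rw [PySem.List.pyRange_one_eq_nil (by omega)]; rfl]
    rw [fold_nil]
  · rw [B_def p k hk, foldl_const_append]
    have hrange : (PySem.List.pyRange 0 ((List.replicate k.toNat (0:Int)).length : Int)).length = k.toNat := by
      simp [PySem.List.length_pyRange_one]
      omega
    rw [hrange]
    simp only [List.nil_append]
    exact fold_equiv _ _ _ _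
      (by simpa using models_build k.toNat 0 k.toNat (by omega) (by omega))
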